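-- pv_equiv track=rewrite | github.com/AnibalBenAlbarn/HyperSpin-Manager | tabs/create_system.py | make_joytokey_cfg
-- ===== SOURCE A (Python) =====
-- def make_joytokey_cfg(system_name: str, num_joysticks: int = 2) -> str:
--     """
--     Plantilla de perfil JoyToKey (.cfg) basada en el formato real de MAME.cfg.
--     Genera un perfil base con todos los botones a 0 (sin asignar).
--     """
--     lines = [
--         "{LICENSE_SECTION}",
--         "[General]",
--         "FileVersion=51",
--         f"NumberOfJoysticks={num_joysticks}",
--         "DisplayMode=2",
--         "UseDiagonalInput=0",
--         "UsePOV8Way=0",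
--         "Threshold=20",
--         "Threshold2=20",
--         "KeySendMode=0",
--     ]
--     for joy_n in range(1, num_joysticks + 1):
--         lines.append(f"[Joystick {joy_n}]")
--         for i in range(1, 9):
--             lines.append(f"Axis{i}n=0")
--             lines.append(f"Axis{i}p=0")
--         for p in range(1, 3):
--             for d in range(1, 9):
--                 lines.append(f"POV{p}-{d}=0")
--         lines += [
--             "Up-Right=0", "Up- Left=0", "Dn- Left=0", "Dn-Right=0",
--             "Up-Right2=0", "Up- Left2=0", "Dn- Left2=0", "Dn-Right2=0",
--         ]
--         for b in range(1, 33):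
--             lines.append(f"Button{b:02d}=0")
--     return "\n".join(lines) + "\n"
-- ===== SOURCE B (Python) =====
-- # B: the per-joystick block and the header are constant text templates written out
-- # literally; the result is built by direct string concatenation (no line lists, no
-- # loops over fields, no join) -- a different decomposition of the same output.
--
-- _BODY = (
--     "Axis1n=0\n"
--     "Axis1p=0\n"
--     "Axis2n=0\n"
--     "Axis2p=0\n"
--     "Axis3n=0\n"
--     "Axis3p=0\n"
--     "Axis4n=0\n"
--     "Axis4p=0\n"
--     "Axis5n=0\n"
--     "Axis5p=0\n"
--     "Axis6n=0\n"
--     "Axis6p=0\n"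
--     "Axis7n=0\n"
--     "Axis7p=0\n"
--     "Axis8n=0\n"
--     "Axis8p=0\n"
--     "POV1-1=0\n"
--     "POV1-2=0\n"
--     "POV1-3=0\n"
--     "POV1-4=0\n"
--     "POV1-5=0\n"
--     "POV1-6=0\n"
--     "POV1-7=0\n"
--     "POV1-8=0\n"
--     "POV2-1=0\n"
--     "POV2-2=0\n"
--     "POV2-3=0\n"
--     "POV2-4=0\n"
--     "POV2-5=0\n"
--     "POV2-6=0\n"
--     "POV2-7=0\n"
--     "POV2-8=0\n"
--     "Up-Right=0\n"
--     "Up- Left=0\n"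
--     "Dn- Left=0\n"
--     "Dn-Right=0\n"
--     "Up-Right2=0\n"
--     "Up- Left2=0\n"
--     "Dn- Left2=0\n"
--     "Dn-Right2=0\n"
--     "Button01=0\n"
--     "Button02=0\n"
--     "Button03=0\n"
--     "Button04=0\n"
--     "Button05=0\n"
--     "Button06=0\n"
--     "Button07=0\n"
--     "Button08=0\n"
--     "Button09=0\n"
--     "Button10=0\n"
--     "Button11=0\n"
--     "Button12=0\n"
--     "Button13=0\n"
--     "Button14=0\n"
--     "Button15=0\n"
--     "Button16=0\n"
--     "Button17=0\n"
--     "Button18=0\n"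
--     "Button19=0\n"
--     "Button20=0\n"
--     "Button21=0\n"
--     "Button22=0\n"
--     "Button23=0\n"
--     "Button24=0\n"
--     "Button25=0\n"
--     "Button26=0\n"
--     "Button27=0\n"
--     "Button28=0\n"
--     "Button29=0\n"
--     "Button30=0\n"
--     "Button31=0\n"
--     "Button32=0\n"
-- )
--
--
-- def make_joytokey_cfg(system_name: str, num_joysticks: int = 2) -> str:
--     out = ("{LICENSE_SECTION}\n[General]\nFileVersion=51\nNumberOfJoysticks="
--            + str(num_joysticks)
--            + "\nDisplayMode=2\nUseDiagonalInput=0\nUsePOV8Way=0\nThreshold=20\nThreshold2=20\nKeySendMode=0\n")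
--     for n in range(1, num_joysticks + 1):
--         out += "[Joystick " + str(n) + "]\n" + _BODY
--     return out
-- ===== Notes on version B (the rewrite author's own statement) =====
-- stated objective: faster
-- what changed: B replaces A's nested field-generating loops and final newline-join by two literal text templates (header, per-joystick block) and a single loop that concatenates template copies directly into the output string.
import Mathlib
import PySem

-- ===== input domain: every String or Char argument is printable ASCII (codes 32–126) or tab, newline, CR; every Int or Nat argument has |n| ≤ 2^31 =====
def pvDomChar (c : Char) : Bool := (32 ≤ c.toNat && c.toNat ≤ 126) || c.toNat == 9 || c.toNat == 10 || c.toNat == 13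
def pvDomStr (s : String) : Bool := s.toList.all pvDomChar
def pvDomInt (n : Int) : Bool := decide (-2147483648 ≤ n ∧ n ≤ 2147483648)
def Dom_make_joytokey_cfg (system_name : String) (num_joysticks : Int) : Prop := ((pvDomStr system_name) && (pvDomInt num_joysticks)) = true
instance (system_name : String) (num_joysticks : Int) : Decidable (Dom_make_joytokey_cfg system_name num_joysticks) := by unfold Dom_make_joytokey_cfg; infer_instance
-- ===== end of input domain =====

-- B replaces A's nested field-generating loops and newline-join by two literal text
-- templates (header, per-joystick block) concatenated directly (objective: alternative).

-- ===== PORT A =====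
-- f"{b:02d}" for 0 ≤ b < 100: exact hand port (pad with one leading zero below 10)
def pad2 (b : Int) : String := if b < 10 then "0" ++ PySem.Int.toStr b else PySem.Int.toStr b

def make_joytokey_cfg (system_name : String) (num_joysticks : Int) : String :=
  let lines : List String := [
    "{LICENSE_SECTION}",
    "[General]",
    "FileVersion=51",
    "NumberOfJoysticks=" ++ PySem.Int.toStr num_joysticks,
    "DisplayMode=2",
    "UseDiagonalInput=0",
    "UsePOV8Way=0",
    "Threshold=20",
    "Threshold2=20",
    "KeySendMode=0"]
  let lines := (PySem.List.pyRange 1 (num_joysticks + 1) 1).foldl (fun lines joy_n =>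
    let lines := lines ++ ["[Joystick " ++ PySem.Int.toStr joy_n ++ "]"]
    let lines := (PySem.List.pyRange 1 9 1).foldl (fun lines i =>
      lines ++ ["Axis" ++ PySem.Int.toStr i ++ "n=0"] ++ ["Axis" ++ PySem.Int.toStr i ++ "p=0"]) lines
    let lines := (PySem.List.pyRange 1 3 1).foldl (fun lines p =>
      (PySem.List.pyRange 1 9 1).foldl (fun lines d =>
        lines ++ ["POV" ++ PySem.Int.toStr p ++ "-" ++ PySem.Int.toStr d ++ "=0"]) lines) lines
    let lines := lines ++ [
      "Up-Right=0", "Up- Left=0", "Dn- Left=0", "Dn-Right=0",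
      "Up-Right2=0", "Up- Left2=0", "Dn- Left2=0", "Dn-Right2=0"]
    (PySem.List.pyRange 1 33 1).foldl (fun lines b =>
      lines ++ ["Button" ++ pad2 b ++ "=0"]) lines) lines
  PySem.Str.join "\n" lines ++ "\n"

-- ===== PORT B =====
-- _BODY: the constant per-joystick template, one Lean string literal
def joyBlock : String := "Axis1n=0\nAxis1p=0\nAxis2n=0\nAxis2p=0\nAxis3n=0\nAxis3p=0\nAxis4n=0\nAxis4p=0\nAxis5n=0\nAxis5p=0\nAxis6n=0\nAxis6p=0\nAxis7n=0\nAxis7p=0\nAxis8n=0\nAxis8p=0\nPOV1-1=0\nPOV1-2=0\nPOV1-3=0\nPOV1-4=0\nPOV1-5=0\nPOV1-6=0\nPOV1-7=0\nPOV1-8=0\nPOV2-1=0\nPOV2-2=0\nPOV2-3=0\nPOV2-4=0\nPOV2-5=0\nPOV2-6=0\nPOV2-7=0\nPOV2-8=0\nUp-Right=0\nUp- Left=0\nDn- Left=0\nDn-Right=0\nUp-Right2=0\nUp- Left2=0\nDn- Left2=0\nDn-Right2=0\nButton01=0\nButton02=0\nButton03=0\nButton04=0\nButton05=0\nButton06=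0\nButton07=0\nButton08=0\nButton09=0\nButton10=0\nButton11=0\nButton12=0\nButton13=0\nButton14=0\nButton15=0\nButton16=0\nButton17=0\nButton18=0\nButton19=0\nButton20=0\nButton21=0\nButton22=0\nButton23=0\nButton24=0\nButton25=0\nButton26=0\nButton27=0\nButton28=0\nButton29=0\nButton30=0\nButton31=0\nButton32=0\n"

def make_joytokey_cfg_alt (system_name : String) (num_joysticks : Int) : String :=
  let out : String := "{LICENSE_SECTION}\n[General]\nFileVersion=51\nNumberOfJoysticks="
      ++ PySem.Int.toStr num_joysticks
      ++ "\nDisplayMode=2\nUseDiagonalInput=0\nUsePOV8Way=0\nThreshold=20\nThreshold2=20\nKeySendMode=0\n"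
  (PySem.List.pyRange 1 (num_joysticks + 1) 1).foldl
    (fun out n => out ++ ("[Joystick " ++ PySem.Int.toStr n ++ "]\n" ++ joyBlock)) out

-- ===== PRECONDITION & SPEC =====
def Spec_make_joytokey_cfg (system_name : String) (num_joysticks : Int) (out : String) : Prop := out = make_joytokey_cfg_alt system_name num_joysticks
instance (system_name : String) (num_joysticks : Int) (out : String) : Decidable (Spec_make_joytokey_cfg system_name num_joysticks out) := by unfold Spec_make_joytokey_cfg; infer_instance

-- ===== CLAIM (what is proved, stated in full; the proofs are below) =====
def Claim_equal_make_joytokey_cfg : Prop := ∀ (system_name : String) (num_joysticks : Int), Dom_make_joytokey_cfg system_name num_joysticks → Spec_make_joytokey_cfg system_name num_joysticks (make_joytokey_cfg system_name num_joysticks)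

-- ===== LEMMAS AND PROOFS =====

-- the 64 body lines of one joystick section, as A's loops produce them
def bodyLines : List String :=
  ((PySem.List.pyRange 1 9 1).flatMap (fun i =>
      (["n", "p"]).map (fun s => "Axis" ++ PySem.Int.toStr i ++ s ++ "=0")))
  ++ (([(1 : Int), 2]).flatMap (fun p =>
      (PySem.List.pyRange 1 9 1).map (fun d => "POV" ++ PySem.Int.toStr p ++ "-" ++ PySem.Int.toStr d ++ "=0")))
  ++ ["Up-Right=0", "Up- Left=0", "Dn- Left=0", "Dn-Right=0",
      "Up-Right2=0", "Up- Left2=0", "Dn- Left2=0", "Dn-Right2=0"]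
  ++ ((PySem.List.pyRange 1 33 1).map (fun b => "Button" ++ pad2 b ++ "=0"))

-- concatenation of a list of strings
def mConcat (ls : List String) : String := ls.foldr (fun a b => a ++ b) ""

theorem mConcat_cons (x : String) (xs : List String) : mConcat (x :: xs) = x ++ mConcat xs := rfl

theorem mConcat_append (a b : List String) : mConcat (a ++ b) = mConcat a ++ mConcat b := by
  induction a with
  | nil => simp [mConcat]
  | cons x xs ih => simp [mConcat_cons, ih, String.append_assoc]

-- A's per-joystick loop body appends exactly the section lines
theorem sectionA_eq (acc : List String) (j : Int) :
    ((PySem.List.pyRange 1 33 1).foldl (fun lines b => lines ++ ["Button" ++ pad2 b ++ "=0"])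
      (((PySem.List.pyRange 1 3 1).foldl (fun lines p =>
          (PySem.List.pyRange 1 9 1).foldl (fun lines d =>
            lines ++ ["POV" ++ PySem.Int.toStr p ++ "-" ++ PySem.Int.toStr d ++ "=0"]) lines)
        ((PySem.List.pyRange 1 9 1).foldl (fun lines i =>
            lines ++ ["Axis" ++ PySem.Int.toStr i ++ "n=0"] ++ ["Axis" ++ PySem.Int.toStr i ++ "p=0"])
          (acc ++ ["[Joystick " ++ PySem.Int.toStr j ++ "]"])))
        ++ ["Up-Right=0", "Up- Left=0", "Dn- Left=0", "Dn-Right=0",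
            "Up-Right2=0", "Up- Left2=0", "Dn- Left2=0", "Dn-Right2=0"]))
    = acc ++ (("[Joystick " ++ PySem.Int.toStr j ++ "]") :: bodyLines) := by
  simp only [PySem.List.foldl_append_singleton_eq_map, PySem.List.foldl_append_eq_flatMap,
    bodyLines, List.append_assoc, List.cons_append, List.nil_append]
  congr 1

-- A's whole joystick loop equals the flatMap of sections
theorem linesA_eq (init : List String) (a b : Int) :
    ((PySem.List.pyRange a b 1).foldl (fun lines joy_n =>
      (PySem.List.pyRange 1 33 1).foldl (fun lines b => lines ++ ["Button" ++ pad2 b ++ "=0"])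
        (((PySem.List.pyRange 1 3 1).foldl (fun lines p =>
            (PySem.List.pyRange 1 9 1).foldl (fun lines d =>
              lines ++ ["POV" ++ PySem.Int.toStr p ++ "-" ++ PySem.Int.toStr d ++ "=0"]) lines)
          ((PySem.List.pyRange 1 9 1).foldl (fun lines i =>
              lines ++ ["Axis" ++ PySem.Int.toStr i ++ "n=0"] ++ ["Axis" ++ PySem.Int.toStr i ++ "p=0"])
            (lines ++ ["[Joystick " ++ PySem.Int.toStr joy_n ++ "]"])))
          ++ ["Up-Right=0", "Up- Left=0", "Dn- Left=0", "Dn-Right=0",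
              "Up-Right2=0", "Up- Left2=0", "Dn- Left2=0", "Dn-Right2=0"])) init)
    = init ++ (PySem.List.pyRange a b 1).flatMap
        (fun n => ("[Joystick " ++ PySem.Int.toStr n ++ "]") :: bodyLines) := by
  rw [show (fun (lines : List String) (joy_n : Int) =>
      (PySem.List.pyRange 1 33 1).foldl (fun lines b => lines ++ ["Button" ++ pad2 b ++ "=0"])
        (((PySem.List.pyRange 1 3 1).foldl (fun lines p =>
            (PySem.List.pyRange 1 9 1).foldl (fun lines d =>
              lines ++ ["POV" ++ PySem.Int.toStr p ++ "-" ++ PySem.Int.toStr d ++ "=0"]) lines)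
          ((PySem.List.pyRange 1 9 1).foldl (fun lines i =>
              lines ++ ["Axis" ++ PySem.Int.toStr i ++ "n=0"] ++ ["Axis" ++ PySem.Int.toStr i ++ "p=0"])
            (lines ++ ["[Joystick " ++ PySem.Int.toStr joy_n ++ "]"])))
          ++ ["Up-Right=0", "Up- Left=0", "Dn- Left=0", "Dn-Right=0",
              "Up-Right2=0", "Up- Left2=0", "Dn- Left2=0", "Dn-Right2=0"]))
    = fun (lines : List String) (joy_n : Int) =>
        lines ++ (("[Joystick " ++ PySem.Int.toStr joy_n ++ "]") :: bodyLines) from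
      funext fun acc => funext fun j => sectionA_eq acc j]
  exact PySem.List.foldl_append_eq_flatMap _ _ _

-- "\n".join(ls) + "\n" is the concatenation of the lines each followed by "\n"
theorem join_cons (x y : String) (xs : List String) :
    PySem.Str.join "\n" (x :: y :: xs) = x ++ "\n" ++ PySem.Str.join "\n" (y :: xs) := by
  rw [← String.toList_inj]
  simp [PySem.Str.join, PySem.Chars.join_cons_cons]

theorem join_nl_cons (xs : List String) : ∀ (x : String),
    PySem.Str.join "\n" (x :: xs) ++ "\n" = mConcat ((x :: xs).map (fun l => l ++ "\n")) := by
  induction xs with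
  | nil =>
    intro x
    rw [← String.toList_inj]
    simp [PySem.Str.join, PySem.Chars.join_singleton, mConcat]
  | cons y ys ih =>
    intro x
    rw [join_cons, String.append_assoc, String.append_assoc, ih y]
    simp [mConcat_cons, String.append_assoc]

theorem join_nl (ls : List String) (h : ls ≠ []) :
    PySem.Str.join "\n" ls ++ "\n" = mConcat (ls.map (fun l => l ++ "\n")) := by
  cases ls with
  | nil => exact absurd rfl h
  | cons x xs => exact join_nl_cons xs x

-- B's accumulation loop is concatenation of per-element strings
theorem foldl_str (r : List Int) (g : Int → String) : ∀ (init : String),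
    r.foldl (fun out n => out ++ g n) init = init ++ mConcat (r.map g) := by
  induction r with
  | nil => intro init; simp [mConcat]
  | cons a t ih => intro init; simp [List.foldl_cons, ih, mConcat_cons, String.append_assoc]

-- one section's lines, concatenated, are the "[Joystick n]" line plus the body template
set_option maxRecDepth 100000 in
theorem bodyConcat : mConcat (bodyLines.map (fun l => l ++ "\n")) = joyBlock := by decide

theorem sectionStr_eq (n : Int) :
    mConcat (((("[Joystick " ++ PySem.Int.toStr n ++ "]") :: bodyLines)).map (fun l => l ++ "\n"))
    = "[Joystick " ++ PySem.Int.toStr n ++ "]\n" ++ joyBlock := by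
  rw [List.map_cons, mConcat_cons, bodyConcat, ← String.toList_inj]
  simp [String.toList_append]

theorem sections_eq (r : List Int) :
    mConcat ((r.flatMap (fun n => ("[Joystick " ++ PySem.Int.toStr n ++ "]") :: bodyLines)).map (fun l => l ++ "\n"))
    = mConcat (r.map (fun n => "[Joystick " ++ PySem.Int.toStr n ++ "]\n" ++ joyBlock)) := by
  induction r with
  | nil => rfl
  | cons a t ih =>
    rw [List.flatMap_cons, List.map_append, mConcat_append, sectionStr_eq, ih,
      List.map_cons, mConcat_cons]

theorem headerStr_eq (t : String) :
    mConcat ((["{LICENSE_SECTION}", "[General]", "FileVersion=51",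
      "NumberOfJoysticks=" ++ t, "DisplayMode=2", "UseDiagonalInput=0", "UsePOV8Way=0",
      "Threshold=20", "Threshold2=20", "KeySendMode=0"]).map (fun l => l ++ "\n"))
    = "{LICENSE_SECTION}\n[General]\nFileVersion=51\nNumberOfJoysticks=" ++ t
      ++ "\nDisplayMode=2\nUseDiagonalInput=0\nUsePOV8Way=0\nThreshold=20\nThreshold2=20\nKeySendMode=0\n" := by
  rw [← String.toList_inj]
  simp [mConcat, String.toList_append]

-- ===== VERDICT (by name: the statement is the Claim_ definition above) =====
theorem make_joytokey_cfg_spec : Claim_equal_make_joytokey_cfg := by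
  intro system_name num_joysticks _
  unfold Spec_make_joytokey_cfg make_joytokey_cfg make_joytokey_cfg_alt
  dsimp only
  rw [linesA_eq, join_nl _ (by simp), List.map_append, mConcat_append, sections_eq,
    headerStr_eq, foldl_str, String.append_assoc]
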